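-- pv_equiv track=rewrite | github.com/kalvaakhil/akhil-leetcode | Ticket Counter - GFG/ticket-counter.py | distributeTicket
-- ===== SOURCE A (Python) =====
-- def distributeTicket(n : int, k : int) -> int:
--     N = [i+1 for i in range(n)]
--     if n <= k:
--         return N[-1]
--     for i in range(1, len(N)//k+1):
--             if i%2 != 0:
--                 N = N[k:]
--                 if len(N) <= k:
--                     return N[0]
--                     break
--             else:
--                 N = N[:(len(N) - k)]
--                 if len(N) <= k:
--                     return N[-1]
--                     break
-- ===== SOURCE B (Python) =====
-- def distributeTicket(n: int, k: int) -> int: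
--     # Closed form: the loop stops at iteration i0 = (n-1)//k; odd iterations
--     # drop k from the front, even ones drop k from the back.
--     if n <= k:
--         return n
--     i = (n - 1) // k
--     if i % 2 != 0:
--         return ((i + 1) // 2) * k + 1
--     return n - (i // 2) * k
-- ===== Notes on version B (the rewrite author's own statement) =====
-- stated objective: faster
-- what changed: Replaced the list-building simulation (repeated slicing of a list of n people) by a closed-form O(1) computation of the stopping iteration i0=(n-1)//k and the surviving position.
-- outside the precondition, e.g. on distributeTicket(5, -2): A returns None, B returns 3; on distributeTicket(0, 3): A raises IndexError, B returns 0
import Mathlib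
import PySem

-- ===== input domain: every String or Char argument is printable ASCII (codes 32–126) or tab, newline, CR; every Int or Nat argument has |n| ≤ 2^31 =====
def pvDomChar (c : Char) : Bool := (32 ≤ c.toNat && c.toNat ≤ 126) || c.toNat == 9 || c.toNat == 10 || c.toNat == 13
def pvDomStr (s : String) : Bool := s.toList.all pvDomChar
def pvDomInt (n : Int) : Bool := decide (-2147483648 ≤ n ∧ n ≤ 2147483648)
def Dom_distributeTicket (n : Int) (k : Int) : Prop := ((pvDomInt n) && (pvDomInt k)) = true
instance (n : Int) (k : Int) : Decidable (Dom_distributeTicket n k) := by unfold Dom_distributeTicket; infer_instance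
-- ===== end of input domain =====

-- B replaces A's repeated list slicing by a closed-form computation of the stopping
-- iteration and surviving position (objective: faster, asymptotic).

-- ===== PORT A =====
-- the for-loop of A: first argument is the remaining list of loop indices i,
-- second is the current list N; returns some v at a `return`, none if the loop ends
def distributeTicketLoop (k : Int) : List Int → List Int → Option Int
  | [], _ => none
  | i :: rest, N =>
    if PySem.Int.mod i 2 ≠ 0 then
      let N' := PySem.List.slice N (some k) none          -- N = N[k:]
      if (N'.length : Int) ≤ k then PySem.List.pyGet? N' 0  -- return N[0]
      else distributeTicketLoop k rest N'
    else
      let N' := PySem.List.slice N none (some ((N.length : Int) - k))  -- N = N[:len(N)-k]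
      if (N'.length : Int) ≤ k then PySem.List.pyGet? N' (-1)          -- return N[-1]
      else distributeTicketLoop k rest N'

def distributeTicket (n : Int) (k : Int) : Int :=
  let N := (PySem.List.pyRange 0 n 1).map (fun i => i + 1)   -- [i+1 for i in range(n)]
  if n ≤ k then
    (PySem.List.pyGet? N (-1)).getD 0                        -- none (IndexError) only outside Pre_
  else
    -- for i in range(1, len(N)//k+1): …  (none = loop fell through, Python returns None: outside Pre_)
    (distributeTicketLoop k
      (PySem.List.pyRange 1 (PySem.Int.floordiv (N.length : Int) k + 1) 1) N).getD 0

-- ===== PORT B =====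
def distributeTicket_alt (n : Int) (k : Int) : Int :=
  if n ≤ k then n
  else
    let i := PySem.Int.floordiv (n - 1) k
    if PySem.Int.mod i 2 ≠ 0 then
      PySem.Int.floordiv (i + 1) 2 * k + 1
    else
      n - PySem.Int.floordiv i 2 * k

-- ===== PRECONDITION & SPEC =====
-- Pre_ excludes n ≤ 0 and k ≤ 0: there A raises (IndexError for n ≤ 0 with n ≤ k,
-- ZeroDivisionError for k = 0 < n) or falls off the loop returning None (k < 0), never
-- an int of the declared type.
def Pre_distributeTicket (n : Int) (k : Int) : Prop := 1 ≤ n ∧ 1 ≤ k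
instance (n : Int) (k : Int) : Decidable (Pre_distributeTicket n k) := by unfold Pre_distributeTicket; infer_instance
def pvWitness_distributeTicket : Int × Int := (7, 2)

def Spec_distributeTicket (n : Int) (k : Int) (out : Int) : Prop := out = distributeTicket_alt n k
instance (n : Int) (k : Int) (out : Int) : Decidable (Spec_distributeTicket n k out) := by unfold Spec_distributeTicket; infer_instance

-- ===== CLAIM (what is proved, stated in full; the proofs are below) =====
def Claim_equal_distributeTicket : Prop := ∀ (n : Int) (k : Int), Dom_distributeTicket n k → Pre_distributeTicket n k → Spec_distributeTicket n k (distributeTicket n k)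


-- ===== LEMMAS AND PROOFS =====

-- consecutive-run view of A's list N: drop/take of a range is a range
lemma pv_drop_pyRange (a b : Int) (j : Nat) :
    (PySem.List.pyRange a b 1).drop j = PySem.List.pyRange (a + j) b 1 := by
  apply List.ext_getElem
  · simp [PySem.List.length_pyRange_one]; omega
  · intro i h1 h2
    rw [List.getElem_drop, PySem.List.getElem_pyRange_one, PySem.List.getElem_pyRange_one]
    push_cast; ring

lemma pv_take_pyRange (a b : Int) (j : Nat) (h : (j:Int) ≤ b - a) :
    (PySem.List.pyRange a b 1).take j = PySem.List.pyRange a (a + j) 1 := by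
  apply List.ext_getElem
  · simp [PySem.List.length_pyRange_one]; omega
  · intro i h1 h2
    rw [List.getElem_take, PySem.List.getElem_pyRange_one, PySem.List.getElem_pyRange_one]

lemma pv_pyGet?_pyRange_zero (a b : Int) (h : a < b) :
    PySem.List.pyGet? (PySem.List.pyRange a b 1) 0 = some a := by
  rw [PySem.List.pyRange_one_cons h]; simp [PySem.List.pyGet?, PySem.List.pyIdx?]

lemma pv_pyGet?_pyRange_neg_one (a b : Int) (h : a < b) :
    PySem.List.pyGet? (PySem.List.pyRange a b 1) (-1) = some (b - 1) := by
  have heq : PySem.List.pyRange a b 1 = PySem.List.pyRange a (b-1) 1 ++ [b-1] := by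
    have := PySem.List.pyRange_one_succ_right (a := a) (b := b - 1) (by omega)
    simpa using this
  rw [heq]; simp [pysem]

lemma pv_initN (m : Nat) :
    ((PySem.List.pyRange 0 (m:Int) 1).map (fun i => i + 1)) = PySem.List.pyRange 1 (1 + (m:Int)) 1 := by
  apply List.ext_getElem
  · simp [PySem.List.length_pyRange_one]
  · intro i h1 h2
    rw [List.getElem_map, PySem.List.getElem_pyRange_one, PySem.List.getElem_pyRange_one]
    ring

-- closed form of a run of A's loop on the list a, a+1, …, a+m-1 with k = K:
-- t = iterations still executed, o = odd-indexed (front-removing) ones among them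
def pvSegAns (K : Nat) (i a : Int) (m : Nat) : Int :=
  let t : Nat := (m - 1) / K
  let o : Nat := if i % 2 = 0 then t / 2 else (t + 1) / 2
  if (i + (t:Int) - 1) % 2 ≠ 0 then a + (o:Int) * (K:Int)
  else a + (m:Int) - 1 - ((t - o : Nat):Int) * (K:Int)

lemma pv_loopSeg (K : Nat) (hK : 1 ≤ K) :
    ∀ (m : Nat) (a i T : Int), K < m →
      i + (((m-1)/K : Nat) : Int) ≤ T →
      distributeTicketLoop (K:Int) (PySem.List.pyRange i T 1) (PySem.List.pyRange a (a + (m:Int)) 1)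
        = some (pvSegAns K i a m) := by
  intro m
  induction m using Nat.strong_induction_on with
  | _ m IH =>
    intro a i T hKm hT
    obtain ⟨t, htdef⟩ : ∃ t, (m - 1)/K = t := ⟨_, rfl⟩
    rw [htdef] at hT
    have ht1 : 1 ≤ t := htdef ▸ (Nat.le_div_iff_mul_le (by omega)).mpr (by omega)
    have hiT : i < T := by omega
    have ht_eq : m - K ≤ K → t = 1 := fun h => by
      have h2 : (m - 1)/K < 2 := (Nat.div_lt_iff_lt_mul (by omega)).mpr (by omega)
      omega
    have ht' : K < m - K → (m - K - 1)/K = t - 1 := fun h => by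
      have heq : m - K - 1 + K = m - 1 := by omega
      have h2 : (m - K - 1 + K)/K = (m - K - 1)/K + 1 := Nat.add_div_right _ (by omega)
      rw [heq] at h2; omega
    have hmk : ((m - K : Nat):Int) = (m:Int) - (K:Int) := by omega
    rw [PySem.List.pyRange_one_cons hiT]
    simp only [distributeTicketLoop]
    rw [PySem.Int.mod_eq_emod_of_pos (by norm_num : (0:Int) < 2)]
    have hlen : ((PySem.List.pyRange a (a + (m:Int)) 1).length : Int) = (m:Int) := by
      rw [PySem.List.length_pyRange_one]; omega
    by_cases hpar : i % 2 = 0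
    · -- i even: N = N[:len(N)-k]
      rw [if_neg (by omega : ¬ (i % 2 ≠ 0))]
      rw [hlen]
      have hslice : PySem.List.slice (PySem.List.pyRange a (a + (m:Int)) 1) none (some ((m:Int) - (K:Int)))
          = PySem.List.pyRange a (a + ((m - K : Nat):Int)) 1 := by
        rw [PySem.List.slice_to _ (by omega : (0:Int) ≤ (m:Int) - (K:Int))]
        have h1 : ((m:Int) - (K:Int)).toNat = m - K := by omega
        rw [h1, pv_take_pyRange _ _ _ (by omega)]
      rw [hslice]
      have hlen' : ((PySem.List.pyRange a (a + ((m - K : Nat):Int)) 1).length : Int) = ((m - K : Nat):Int) := by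
        rw [PySem.List.length_pyRange_one]; omega
      rw [hlen']
      by_cases hstop : m - K ≤ K
      · rw [if_pos (by omega)]
        rw [pv_pyGet?_pyRange_neg_one _ _ (by omega)]
        have ht1' : t = 1 := ht_eq hstop
        unfold pvSegAns
        simp only [htdef, ht1']
        rw [if_neg (by push_cast; omega : ¬ ((i + ((1:Nat):Int) - 1) % 2 ≠ 0)), if_pos hpar]
        have h12 : (1 - 1/2 : Nat) = 1 := by norm_num
        rw [h12, Nat.cast_one, one_mul]
        exact congrArg some (by omega)
      · rw [if_neg (by omega)]
        have hrec := IH (m - K) (by omega) a (i+1) T (by omega)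
          (by rw [ht' (by omega)]; omega)
        rw [hrec]
        congr 1
        unfold pvSegAns
        rw [ht' (by omega)]
        simp only [htdef]
        rw [if_neg (by omega : ¬ (i + 1) % 2 = 0), if_pos hpar]
        have hlast : i + 1 + ((t - 1 : Nat):Int) - 1 = i + (t:Int) - 1 := by omega
        rw [hlast]
        have htt : t - 1 + 1 = t := by omega
        rw [htt]
        by_cases hl : (i + (t:Int) - 1) % 2 = 0
        · rw [if_neg (by omega), if_neg (by omega)]
          have ho : t - t/2 = (t - 1) - t/2 + 1 := by omega
          rw [ho, hmk]; push_cast; ring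
        · rw [if_pos (by omega), if_pos (by omega)]
    · -- i odd: N = N[k:]
      rw [if_pos (by omega : i % 2 ≠ 0)]
      have hslice : PySem.List.slice (PySem.List.pyRange a (a + (m:Int)) 1) (some (K:Int)) none
          = PySem.List.pyRange (a + (K:Int)) (a + (m:Int)) 1 := by
        rw [PySem.List.slice_from _ (by omega : (0:Int) ≤ (K:Int))]
        have h1 : ((K:Int)).toNat = K := by omega
        rw [h1, pv_drop_pyRange]
      rw [hslice]
      have hlen' : ((PySem.List.pyRange (a + (K:Int)) (a + (m:Int)) 1).length : Int) = ((m - K : Nat):Int) := by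
        rw [PySem.List.length_pyRange_one]; omega
      rw [hlen']
      by_cases hstop : m - K ≤ K
      · rw [if_pos (by omega)]
        rw [pv_pyGet?_pyRange_zero _ _ (by omega)]
        have ht1' : t = 1 := ht_eq hstop
        unfold pvSegAns
        simp only [htdef, ht1']
        rw [if_pos (by push_cast; omega : (i + ((1:Nat):Int) - 1) % 2 ≠ 0), if_neg hpar]
        have h12 : ((1 + 1)/2 : Nat) = 1 := by norm_num
        rw [h12, Nat.cast_one, one_mul]
      · rw [if_neg (by omega)]
        have hsplit : a + (m:Int) = (a + (K:Int)) + ((m - K : Nat):Int) := by omega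
        rw [hsplit]
        have hrec := IH (m - K) (by omega) (a + (K:Int)) (i+1) T (by omega)
          (by rw [ht' (by omega)]; omega)
        rw [hrec]
        congr 1
        unfold pvSegAns
        rw [ht' (by omega)]
        simp only [htdef]
        rw [if_neg hpar, if_pos (by omega : (i + 1) % 2 = 0)]
        have hlast : i + 1 + ((t - 1 : Nat):Int) - 1 = i + (t:Int) - 1 := by omega
        rw [hlast]
        by_cases hl : (i + (t:Int) - 1) % 2 = 0
        · rw [if_neg (by omega), if_neg (by omega)]
          have ho : t - (t+1)/2 = (t - 1) - (t - 1)/2 := by omega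
          rw [ho, hmk]; ring
        · rw [if_pos (by omega), if_pos (by omega)]
          have ho : (t+1)/2 = (t-1)/2 + 1 := by omega
          rw [ho]; push_cast; ring

-- ===== VERDICT (by name: the statement is the Claim_ definition above) =====
theorem distributeTicket_spec : Claim_equal_distributeTicket := by
  intro n k _ hpre
  obtain ⟨hn, hk⟩ := hpre
  obtain ⟨K, rfl⟩ : ∃ K : Nat, k = (K:Int) := ⟨k.toNat, by omega⟩
  obtain ⟨m, rfl⟩ : ∃ m : Nat, n = (m:Int) := ⟨n.toNat, by omega⟩
  have hK1 : 1 ≤ K := by omega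
  have hm1 : 1 ≤ m := by omega
  simp only [Spec_distributeTicket, distributeTicket, distributeTicket_alt]
  rw [pv_initN m]
  by_cases hle : (m:Int) ≤ (K:Int)
  · rw [if_pos hle, if_pos hle]
    rw [pv_pyGet?_pyRange_neg_one _ _ (by omega)]
    simp only [Option.getD_some]; omega
  · rw [if_neg hle, if_neg hle]
    have hlen : ((PySem.List.pyRange 1 (1 + (m:Int)) 1).length : Int) = (m:Int) := by
      rw [PySem.List.length_pyRange_one]; omega
    rw [hlen]
    have hfd : PySem.Int.floordiv ((m:Int)) ((K:Int)) = ((m / K : Nat):Int) := by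
      exact_mod_cast PySem.Int.floordiv_natCast m K
    rw [hfd]
    have hmain := pv_loopSeg K hK1 m 1 1 (((m / K : Nat):Int) + 1) (by omega)
      (by have := Nat.div_le_div_right (c := K) (Nat.sub_le m 1); omega)
    rw [hmain]
    simp only [Option.getD_some]
    have hfd2 : PySem.Int.floordiv ((m:Int) - 1) ((K:Int)) = (((m - 1)/K : Nat):Int) := by
      have h : ((m:Int) - 1) = (((m - 1 : Nat)):Int) := by omega
      rw [h]
      exact_mod_cast PySem.Int.floordiv_natCast (m-1) K
    simp only [hfd2]
    rw [PySem.Int.mod_eq_emod_of_pos (by norm_num : (0:Int) < 2)]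
    unfold pvSegAns
    obtain ⟨t, htdef⟩ : ∃ t, (m - 1)/K = t := ⟨_, rfl⟩
    simp only [htdef]
    have ht1 : 1 ≤ t := htdef ▸ (Nat.le_div_iff_mul_le (by omega)).mpr (by omega)
    rw [if_neg (by norm_num : ¬ ((1:Int) % 2 = 0))]
    by_cases hpt : t % 2 = 0
    · rw [if_neg (by omega : ¬ (((t:Nat):Int) % 2 ≠ 0)), if_neg (by omega : ¬ ((1 + ((t:Nat):Int) - 1) % 2 ≠ 0))]
      have h1 : PySem.Int.floordiv ((t:Nat):Int) 2 = ((t/2 : Nat):Int) := by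
        exact_mod_cast PySem.Int.floordiv_natCast t 2
      rw [h1]
      have ho : t - (t+1)/2 = t/2 := by omega
      rw [ho]; push_cast; ring
    · rw [if_pos (by omega : ((t:Nat):Int) % 2 ≠ 0), if_pos (by omega : (1 + ((t:Nat):Int) - 1) % 2 ≠ 0)]
      have h1 : PySem.Int.floordiv (((t:Nat):Int) + 1) 2 = (((t+1)/2 : Nat):Int) := by
        have h : (((t:Nat):Int) + 1) = (((t+1 : Nat)):Int) := by omega
        rw [h]
        exact_mod_cast PySem.Int.floordiv_natCast (t+1) 2
      rw [h1]; push_cast; ring
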